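-- pv_equiv track=rewrite | github.com/XinnuoXu/AggGen | webnlg/get_tree.py | one_verb
-- ===== SOURCE A (Python) =====
-- def tags_check(tags):
--     # ignore tags with less than(include) two components
--     if len(set([tag for tag in tags if tag != "O"])) < 3:
--         return False
--     return True
--
-- def one_verb(v_item, slen):
--     if ("verb" not in v_item) \
--         or ("tags" not in v_item) \
--         or ("description" not in v_item) \
--         or "B-V" not in v_item["tags"]:
--         return -1, -1, -1, []
--     if not tags_check(v_item["tags"]):
--         return -1, -1, -1, []
--
--     b_idx = 0; e_idx = slen - 1
--     # Fact begin index
--     while b_idx < slen and v_item["tags"][b_idx] == "O":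
--         b_idx += 1
--     # Fact end index
--     while e_idx >= 0 and v_item["tags"][e_idx] == "O":
--         e_idx -= 1
--     e_idx += 1
--     # Fact verb index
--     v_idx = v_item["tags"].index("B-V")
--     if b_idx >= e_idx:
--         return -1, -1, -1, []
--     # Extract semantic roles
--     segments = []; seg_b_idx = -1; last_seg_label = ""
--     for i in range(b_idx, e_idx):
--         if v_item["tags"][i][0] == "B":
--             if seg_b_idx != -1:
--                 segments.append((seg_b_idx, i, last_seg_label))
--             last_seg_label = v_item["tags"][i][2:]
--             seg_b_idx = i
--         elif v_item["tags"][i][0] == "O":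
--             if seg_b_idx != -1:
--                 segments.append((seg_b_idx, i, last_seg_label))
--             last_seg_label = ""; seg_b_idx = -1
--     if seg_b_idx != -1:
--         segments.append((seg_b_idx, e_idx, last_seg_label))
--     return b_idx, e_idx, v_idx, segments
-- ===== SOURCE B (Python) =====
-- def one_verb(v_item, slen):
--     if ("verb" not in v_item) or ("tags" not in v_item) or ("description" not in v_item):
--         return -1, -1, -1, []
--     tags = v_item["tags"]
--     if "B-V" not in tags or len({t for t in tags if t != "O"}) < 3:
--         return -1, -1, -1, []
--     b_idx = 0
--     while b_idx < slen and tags[b_idx] == "O":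
--         b_idx += 1
--     e_idx = slen - 1
--     while e_idx >= 0 and tags[e_idx] == "O":
--         e_idx -= 1
--     e_idx += 1
--     if b_idx >= e_idx:
--         return -1, -1, -1, []
--     v_idx = tags.index("B-V")
--     # two-phase: collect break points, then pair consecutive ones
--     bp = [i for i in range(b_idx, e_idx) if tags[i][0] in ("B", "O")] + [e_idx]
--     segments = [(p, q, tags[p][2:]) for p, q in zip(bp, bp[1:]) if tags[p][0] == "B"]
--     return b_idx, e_idx, v_idx, segments
-- ===== Notes on version B (the rewrite author's own statement) =====
-- stated objective: alternative
-- what changed: The running-state segment machine (seg_b_idx/last_seg_label mutated across the loop, plus a trailing flush) is replaced by a two-phase decomposition: first collect the break-point indices (positions whose tag starts with 'B' or 'O') with the sentinel e_idx appended, then pair consecutive break points and emit a segment for each 'B' break point; guard checks, boundary while-scans and tags.index('B-V') are forced and kept.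
import Mathlib
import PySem

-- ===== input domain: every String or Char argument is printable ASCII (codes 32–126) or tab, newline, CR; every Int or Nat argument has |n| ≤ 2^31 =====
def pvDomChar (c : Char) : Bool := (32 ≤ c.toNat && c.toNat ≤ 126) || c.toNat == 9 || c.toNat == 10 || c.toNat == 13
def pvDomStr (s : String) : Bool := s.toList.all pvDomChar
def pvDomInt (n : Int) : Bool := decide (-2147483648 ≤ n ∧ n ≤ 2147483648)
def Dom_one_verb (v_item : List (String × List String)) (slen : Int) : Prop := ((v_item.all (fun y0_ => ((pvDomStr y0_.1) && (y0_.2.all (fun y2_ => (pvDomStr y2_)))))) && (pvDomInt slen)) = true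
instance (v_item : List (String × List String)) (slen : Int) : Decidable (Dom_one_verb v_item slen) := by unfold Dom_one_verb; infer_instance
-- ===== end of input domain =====

-- B replaces A's running-state segment machine by a two-phase "collect break points, then pair
-- consecutive ones" decomposition (alternative, same cost); guards and boundary scans are forced.


-- ===== PORT A =====
-- helper tags_check, as in the Python module
def tags_check (tags : List String) : Bool :=
  if PySem.Set.len (PySem.Set.ofList (tags.filter (fun t => t ≠ "O"))) < 3 then false else true

-- 'while b_idx < slen and tags[b_idx] == "O": b_idx += 1'
def pvA_bscan (tags : List String) (slen b : Int) : Int :=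
  if h : b < slen then
    match PySem.List.pyGet? tags b with
    | some t => if t = "O" then pvA_bscan tags slen (b + 1) else b
    | none => b  -- Python raises IndexError here; outside Pre_
  else b
termination_by (slen - b).toNat
decreasing_by omega

-- 'while e_idx >= 0 and tags[e_idx] == "O": e_idx -= 1'
def pvA_escan (tags : List String) (e : Int) : Int :=
  if h : 0 ≤ e then
    match PySem.List.pyGet? tags e with
    | some t => if t = "O" then pvA_escan tags (e - 1) else e
    | none => e  -- Python raises IndexError here; outside Pre_
  else e
termination_by (e + 1).toNat
decreasing_by omega

-- one iteration of A's segment loop; state = (segments, seg_b_idx, last_seg_label)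
def pvA_step (tags : List String) (st : List (Int × Int × String) × Int × String) (i : Int) :
    List (Int × Int × String) × Int × String :=
  let t := (PySem.List.pyGet? tags i).getD ""
  match PySem.Str.pyGet? t 0 with
  | some c =>
    if c = 'B' then
      ((if st.2.1 ≠ -1 then st.1 ++ [(st.2.1, i, st.2.2)] else st.1), i, PySem.Str.slice t (some 2) none)
    else if c = 'O' then
      ((if st.2.1 ≠ -1 then st.1 ++ [(st.2.1, i, st.2.2)] else st.1), -1, "")
    else st
  | none => st  -- Python raises IndexError (empty tag); outside Pre_

-- A's trailing 'if seg_b_idx != -1: segments.append((seg_b_idx, e_idx, last_seg_label))'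
def pvA_flush (e : Int) (st : List (Int × Int × String) × Int × String) : List (Int × Int × String) :=
  if st.2.1 ≠ -1 then st.1 ++ [(st.2.1, e, st.2.2)] else st.1

def one_verb (v_item : List (String × List String)) (slen : Int) :
    Int × Int × Int × (List (Int × Int × String)) :=
  let d : PySem.Dict String (List String) := ⟨v_item⟩
  if (d.get? "verb").isNone || (d.get? "tags").isNone || (d.get? "description").isNone
      || !((d.getD "tags" []).contains "B-V") then (-1, -1, -1, [])
  else if !(tags_check (d.getD "tags" [])) then (-1, -1, -1, [])
  else
    let tags := d.getD "tags" []
    let b_idx := pvA_bscan tags slen 0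
    let e_idx := pvA_escan tags (slen - 1) + 1
    let v_idx : Int := ((PySem.List.index? tags "B-V").getD 0 : Nat)
    if b_idx ≥ e_idx then (-1, -1, -1, [])
    else
      let st := (PySem.List.pyRange b_idx e_idx 1).foldl (pvA_step tags) ([], -1, "")
      (b_idx, e_idx, v_idx, pvA_flush e_idx st)

-- ===== PORT B =====
def pvB_bscan (tags : List String) (slen b : Int) : Int :=
  if h : b < slen then
    match PySem.List.pyGet? tags b with
    | some t => if t = "O" then pvB_bscan tags slen (b + 1) else b
    | none => b  -- Python raises IndexError here; outside Pre_
  else b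
termination_by (slen - b).toNat
decreasing_by omega

def pvB_escan (tags : List String) (e : Int) : Int :=
  if h : 0 ≤ e then
    match PySem.List.pyGet? tags e with
    | some t => if t = "O" then pvB_escan tags (e - 1) else e
    | none => e  -- Python raises IndexError here; outside Pre_
  else e
termination_by (e + 1).toNat
decreasing_by omega

-- 'tags[i][0] in ("B", "O")'
def pvB_isBP (tags : List String) (i : Int) : Bool :=
  match PySem.Str.pyGet? ((PySem.List.pyGet? tags i).getD "") 0 with
  | some c => c = 'B' || c = 'O'
  | none => false  -- Python raises IndexError (empty tag); outside Pre_

-- the comprehension body: emit (p, q, tags[p][2:]) when tags[p][0] == "B"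
def pvB_emit (tags : List String) (pq : Int × Int) : Option (Int × Int × String) :=
  let t := (PySem.List.pyGet? tags pq.1).getD ""
  if PySem.Str.pyGet? t 0 = some 'B' then some (pq.1, pq.2, PySem.Str.slice t (some 2) none)
  else none

def one_verb_alt (v_item : List (String × List String)) (slen : Int) :
    Int × Int × Int × (List (Int × Int × String)) :=
  let d : PySem.Dict String (List String) := ⟨v_item⟩
  if (d.get? "verb").isNone || (d.get? "tags").isNone || (d.get? "description").isNone then
    (-1, -1, -1, [])
  else
    let tags := d.getD "tags" []
    if !(tags.contains "B-V")
        || PySem.Set.len (PySem.Set.ofList (tags.filter (fun t => t ≠ "O"))) < 3 then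
      (-1, -1, -1, [])
    else
      let b_idx := pvB_bscan tags slen 0
      let e_idx := pvB_escan tags (slen - 1) + 1
      if b_idx ≥ e_idx then (-1, -1, -1, [])
      else
        let v_idx : Int := ((PySem.List.index? tags "B-V").getD 0 : Nat)
        let bp := ((PySem.List.pyRange b_idx e_idx 1).filter (pvB_isBP tags)) ++ [e_idx]
        (b_idx, e_idx, v_idx, (bp.zip (bp.drop 1)).filterMap (pvB_emit tags))

-- ===== PRECONDITION & SPEC =====
-- the slice of tags the segment loop actually reads: tags[:slen] with the leading and
-- trailing runs of "O" removed
def pvScanRegion (tags : List String) (slen : Int) : List String :=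
  let w := tags.take slen.toNat
  let b := (w.takeWhile (fun t => t == "O")).length
  let e := w.length - (w.reverse.takeWhile (fun t => t == "O")).length
  (w.take e).drop b

-- Exactly the inputs on which the Python A returns: either a guard sends it into an early
-- return, or slen is at most len(tags) (else the boundary scans raise IndexError) and no
-- empty tag string lies in the scanned region (else tags[i][0] raises IndexError).
def Pre_one_verb (v_item : List (String × List String)) (slen : Int) : Prop :=
  let tags := PySem.Dict.getD (PySem.Dict.mk v_item) "tags" []
  (¬ ((PySem.Dict.get? (PySem.Dict.mk v_item) "verb").isSome = true
      ∧ (PySem.Dict.get? (PySem.Dict.mk v_item) "tags").isSome = true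
      ∧ (PySem.Dict.get? (PySem.Dict.mk v_item) "description").isSome = true
      ∧ "B-V" ∈ tags
      ∧ 3 ≤ PySem.Set.len (PySem.Set.ofList (tags.filter (fun t => t ≠ "O")))))
  ∨ (slen ≤ (tags.length : Int) ∧ "" ∉ pvScanRegion tags slen)

instance (v_item : List (String × List String)) (slen : Int) : Decidable (Pre_one_verb v_item slen) := by
  unfold Pre_one_verb; infer_instance

def pvWitness_one_verb : (List (String × List String)) × Int :=
  ([("verb", ["eat"]), ("tags", ["B-ARG0", "B-V", "B-ARG1"]), ("description", ["d"])], 3)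

def Spec_one_verb (v_item : List (String × List String)) (slen : Int) (out : Int × Int × Int × (List (Int × Int × String))) : Prop := out = one_verb_alt v_item slen
instance (v_item : List (String × List String)) (slen : Int) (out : Int × Int × Int × (List (Int × Int × String))) : Decidable (Spec_one_verb v_item slen out) := by unfold Spec_one_verb; infer_instance

-- ===== CLAIM (what is proved, stated in full; the proofs are below) =====
def Claim_equal_one_verb : Prop := ∀ (v_item : List (String × List String)) (slen : Int), Dom_one_verb v_item slen → Pre_one_verb v_item slen → Spec_one_verb v_item slen (one_verb v_item slen)

-- ===== LEMMAS AND PROOFS =====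

theorem pvB_bscan_eq (tags : List String) (slen b : Int) : pvB_bscan tags slen b = pvA_bscan tags slen b := by
  fun_induction pvA_bscan tags slen b <;> rw [pvB_bscan] <;> simp_all

theorem pvB_escan_eq (tags : List String) (e : Int) : pvB_escan tags e = pvA_escan tags e := by
  fun_induction pvA_escan tags e <;> rw [pvB_escan] <;> simp_all

theorem pvA_bscan_le (tags : List String) (slen b : Int) : b ≤ pvA_bscan tags slen b := by
  fun_induction pvA_bscan tags slen b <;> omega

-- B's second phase, as a function of the index list
def pvBsegs (tags : List String) (e : Int) (l : List Int) : List (Int × Int × String) :=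
  let bp := (l.filter (pvB_isBP tags)) ++ [e]
  (bp.zip (bp.drop 1)).filterMap (pvB_emit tags)

-- the end index the next emitted segment would get: the first break point of l, or e
def pvFirstBP (tags : List String) (e : Int) (l : List Int) : Int :=
  ((l.filter (pvB_isBP tags)) ++ [e]).headD e

theorem pvBsegs_nil (tags : List String) (e : Int) : pvBsegs tags e [] = [] := rfl

theorem pvFirstBP_nil (tags : List String) (e : Int) : pvFirstBP tags e [] = e := rfl

theorem pvBsegs_cons_not_bp (tags : List String) (e i : Int) (l : List Int)
    (h : pvB_isBP tags i = false) : pvBsegs tags e (i :: l) = pvBsegs tags e l := by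
  simp [pvBsegs, List.filter_cons, h]

theorem pvFirstBP_cons_not_bp (tags : List String) (e i : Int) (l : List Int)
    (h : pvB_isBP tags i = false) : pvFirstBP tags e (i :: l) = pvFirstBP tags e l := by
  simp [pvFirstBP, List.filter_cons, h]

theorem pvFirstBP_cons_bp (tags : List String) (e i : Int) (l : List Int)
    (h : pvB_isBP tags i = true) : pvFirstBP tags e (i :: l) = i := by
  simp [pvFirstBP, List.filter_cons, h]

theorem pvBsegs_cons_bp (tags : List String) (e i : Int) (l : List Int)
    (h : pvB_isBP tags i = true) :
    pvBsegs tags e (i :: l) =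
      (pvB_emit tags (i, pvFirstBP tags e l)).toList ++ pvBsegs tags e l := by
  cases hfl : l.filter (pvB_isBP tags) with
  | nil =>
    simp only [pvBsegs, pvFirstBP, List.filter_cons, h, hfl, List.filterMap_cons, if_pos,
      List.nil_append, List.headD, List.drop, List.zip_cons_cons, List.zip_nil_right]
    cases hpe : pvB_emit tags (i, e) <;> simp [hpe]
  | cons a as =>
    simp only [pvBsegs, pvFirstBP, List.filter_cons, h, hfl, List.filterMap_cons, if_pos,
      List.cons_append, List.headD, List.drop, List.zip_cons_cons]
    cases hpe : pvB_emit tags (i, a) <;> simp [hpe]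

-- core invariant: running A's machine from an arbitrary state equals the already-emitted
-- segments, plus the open segment closed at the next break point, plus B's paired break points
theorem pv_machine_eq (tags : List String) (e : Int) :
    ∀ (l : List Int) (segs : List (Int × Int × String)) (segb : Int) (lab : String),
      (∀ i ∈ l, i ≠ -1) →
      pvA_flush e (l.foldl (pvA_step tags) (segs, segb, lab)) =
        segs ++ (if segb ≠ -1 then [(segb, pvFirstBP tags e l, lab)] else []) ++ pvBsegs tags e l := by
  intro l
  induction l with
  | nil =>
    intro segs segb lab _
    simp only [List.foldl_nil, pvA_flush, pvBsegs_nil, pvFirstBP_nil, List.append_nil]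
    split_ifs <;> simp
  | cons i l ih =>
    intro segs segb lab hne
    have hi : i ≠ -1 := hne i (by simp)
    have hl : ∀ j ∈ l, j ≠ -1 := fun j hj => hne j (by simp [hj])
    rw [List.foldl_cons]
    rcases hc : PySem.List.pyGet? ((PySem.List.pyGet? tags i).getD "").toList 0 with _ | c
    · have hstep : pvA_step tags (segs, segb, lab) i = (segs, segb, lab) := by
        simp [pvA_step, hc]
      have hbp : pvB_isBP tags i = false := by simp [pvB_isBP, hc]
      rw [hstep, ih _ _ _ hl, pvBsegs_cons_not_bp tags e i l hbp,
        pvFirstBP_cons_not_bp tags e i l hbp]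
    · by_cases hB : c = 'B'
      · subst hB
        have hstep : pvA_step tags (segs, segb, lab) i =
            ((if segb ≠ -1 then segs ++ [(segb, i, lab)] else segs), i,
              PySem.Str.slice ((PySem.List.pyGet? tags i).getD "") (some 2) none) := by
          simp [pvA_step, hc]
        have hbp : pvB_isBP tags i = true := by simp [pvB_isBP, hc]
        have hemit : pvB_emit tags (i, pvFirstBP tags e l) =
            some (i, pvFirstBP tags e l,
              PySem.Str.slice ((PySem.List.pyGet? tags i).getD "") (some 2) none) := by
          simp [pvB_emit, hc]
        rw [hstep, ih _ _ _ hl, pvBsegs_cons_bp tags e i l hbp, hemit,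
          pvFirstBP_cons_bp tags e i l hbp]
        simp only [hi, if_pos, ne_eq, not_false_iff, Option.toList_some]
        split_ifs <;> simp
      · by_cases hO : c = 'O'
        · subst hO
          have hstep : pvA_step tags (segs, segb, lab) i =
              ((if segb ≠ -1 then segs ++ [(segb, i, lab)] else segs), -1, "") := by
            simp [pvA_step, hc, hB]
          have hbp : pvB_isBP tags i = true := by simp [pvB_isBP, hc]
          have hemit : pvB_emit tags (i, pvFirstBP tags e l) = none := by
            simp [pvB_emit, hc]
          rw [hstep, ih _ _ _ hl, pvBsegs_cons_bp tags e i l hbp, hemit,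
            pvFirstBP_cons_bp tags e i l hbp]
          split_ifs <;> simp_all
        · have hstep : pvA_step tags (segs, segb, lab) i = (segs, segb, lab) := by
            simp [pvA_step, hc, hB, hO]
          have hbp : pvB_isBP tags i = false := by simp [pvB_isBP, hc, hB, hO]
          rw [hstep, ih _ _ _ hl, pvBsegs_cons_not_bp tags e i l hbp,
            pvFirstBP_cons_not_bp tags e i l hbp]

-- ===== VERDICT (by name: the statement is the Claim_ definition above) =====
theorem one_verb_spec : Claim_equal_one_verb := by
  intro v_item slen _ _
  unfold Spec_one_verb
  by_cases hv : (PySem.Dict.get? (⟨v_item⟩ : PySem.Dict String (List String)) "verb").isNone = true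
  · simp [one_verb, one_verb_alt, hv]
  by_cases ht : (PySem.Dict.get? (⟨v_item⟩ : PySem.Dict String (List String)) "tags").isNone = true
  · simp [one_verb, one_verb_alt, hv, ht]
  by_cases hd : (PySem.Dict.get? (⟨v_item⟩ : PySem.Dict String (List String)) "description").isNone = true
  · simp [one_verb, one_verb_alt, hv, ht, hd]
  by_cases hbv : "B-V" ∈ PySem.Dict.getD (⟨v_item⟩ : PySem.Dict String (List String)) "tags" []
  swap
  · simp [one_verb, one_verb_alt, hv, ht, hd, hbv]
  by_cases h3 : (PySem.Set.ofList (List.filter (fun t => !decide (t = "O"))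
      (PySem.Dict.getD (⟨v_item⟩ : PySem.Dict String (List String)) "tags" []))).length < 3
  · simp [one_verb, one_verb_alt, tags_check, PySem.Set.len, hv, ht, hd, hbv, h3]
  · set tags := PySem.Dict.getD (⟨v_item⟩ : PySem.Dict String (List String)) "tags" [] with htags
    set b := pvA_bscan tags slen 0 with hb
    set e := pvA_escan tags (slen - 1) + 1 with he
    have hnn : ∀ i ∈ PySem.List.pyRange b e 1, i ≠ -1 := by
      intro i hi
      have := (PySem.List.mem_pyRange_one.mp hi).1
      have hb0 : (0 : Int) ≤ b := pvA_bscan_le tags slen 0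
      omega
    have hm := pv_machine_eq tags e (PySem.List.pyRange b e 1) [] (-1) "" hnn
    simp only [ne_eq, not_true_eq_false, if_false, List.nil_append, reduceIte] at hm
    simp only [pvBsegs] at hm
    simp [one_verb, one_verb_alt, tags_check, PySem.Set.len, hv, ht, hd, hbv, h3,
      pvB_bscan_eq, pvB_escan_eq, ← htags, ← hb, ← he, hm]
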